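-- pv_equiv track=rewrite | github.com/AlexMarey/AdventOfCode | 2019/4/main.py | checkForMultiples
-- ===== SOURCE A (Python) =====
-- def checkForMultiples(pwd, address):
--     nextAddress = address + 1
--     if(nextAddress > 5):
--         return 5
--     elif(pwd[address] == pwd[nextAddress]):
--         return checkForMultiples(pwd, nextAddress)
--     else:
--         return address
-- ===== SOURCE B (Python) =====
-- def checkForMultiples(pwd, address):
--     # first index >= address (below 5) where the run of equal digits breaks; 5 if it never breaks
--     return next((i for i in range(address, 5) if pwd[i] != pwd[i + 1]), 5)
-- ===== Notes on version B (the rewrite author's own statement) =====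
-- stated objective: idiomatic
-- what changed: Replaces A's recursion with a single idiomatic expression: next() over a generator scanning range(address, 5) for the first index where adjacent characters differ, defaulting to 5.
import Mathlib
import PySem

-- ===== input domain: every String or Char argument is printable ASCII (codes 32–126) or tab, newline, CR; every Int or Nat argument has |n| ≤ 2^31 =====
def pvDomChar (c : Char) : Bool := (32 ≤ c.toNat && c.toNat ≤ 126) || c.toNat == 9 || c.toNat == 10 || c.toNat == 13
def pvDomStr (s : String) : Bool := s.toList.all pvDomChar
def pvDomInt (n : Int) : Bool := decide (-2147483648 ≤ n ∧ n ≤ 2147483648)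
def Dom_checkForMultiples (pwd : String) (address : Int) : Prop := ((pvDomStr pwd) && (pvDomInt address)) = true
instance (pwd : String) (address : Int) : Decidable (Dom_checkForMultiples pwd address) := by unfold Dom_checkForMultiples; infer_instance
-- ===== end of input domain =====

-- B replaces A's recursion by an idiomatic one-liner: the first index in range(address, 5)
-- where the run of equal characters breaks, defaulting to 5. Objective: simpler/idiomatic.

-- ===== PORT A =====
-- literal transliteration of A's recursion; the `| _, _ => 0` arm is Python's IndexError (outside Pre_)
def checkForMultiples (pwd : String) (address : Int) : Int :=
  if 5 < address + 1 then 5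
  else
    match PySem.Str.pyGet? pwd address, PySem.Str.pyGet? pwd (address + 1) with
    | some a, some b => if a = b then checkForMultiples pwd (address + 1) else address
    | _, _ => 0
termination_by (5 - address).toNat
decreasing_by omega

-- ===== PORT B =====
-- transliteration of Source B: next((i for i in range(address, 5) if pwd[i] != pwd[i+1]), 5)
def checkForMultiples_alt (pwd : String) (address : Int) : Int :=
  ((PySem.List.pyRange address 5 1).find?
      (fun i => !(PySem.Str.pyGet? pwd i == PySem.Str.pyGet? pwd (i + 1)))).getD 5

-- ===== PRECONDITION & SPEC =====
-- Pre_ excludes exactly the inputs on which A raises IndexError: an address whose scan of the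
-- equal-character run runs past a string boundary (possible only when the string is shorter than 6
-- and its scanned suffix never breaks, or when the start index is already out of range).
def Pre_checkForMultiples (pwd : String) (address : Int) : Prop :=
  5 ≤ address ∨
  (6 ≤ (pwd.toList.length : Int) ∧ -(pwd.toList.length : Int) ≤ address) ∨
  (-(pwd.toList.length : Int) ≤ address ∧ address < (pwd.toList.length : Int) ∧
    (pwd.toList.length : Int) ≤ 5 ∧
    ∃ i ∈ PySem.List.pyRange address ((pwd.toList.length : Int) - 1) 1,
      PySem.Str.pyGet? pwd i ≠ PySem.Str.pyGet? pwd (i + 1))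
instance (pwd : String) (address : Int) : Decidable (Pre_checkForMultiples pwd address) := by
  unfold Pre_checkForMultiples; infer_instance

def pvWitness_checkForMultiples : String × Int := ("abcdef", 0)

def Spec_checkForMultiples (pwd : String) (address : Int) (out : Int) : Prop := out = checkForMultiples_alt pwd address
instance (pwd : String) (address : Int) (out : Int) : Decidable (Spec_checkForMultiples pwd address out) := by unfold Spec_checkForMultiples; infer_instance

-- ===== CLAIM (what is proved, stated in full; the proofs are below) =====
def Claim_equal_checkForMultiples : Prop := ∀ (pwd : String) (address : Int), Dom_checkForMultiples pwd address → Pre_checkForMultiples pwd address → Spec_checkForMultiples pwd address (checkForMultiples pwd address)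

-- ===== LEMMAS AND PROOFS =====

-- "the scan starting at `address` never indexes out of range": whenever every comparison before
-- position i succeeded, both characters compared at position i exist
def pvNoRaise (pwd : String) (address : Int) : Prop :=
  ∀ i : Int, address ≤ i → i ≤ 4 →
    (∀ j : Int, address ≤ j → j < i →
      PySem.Str.pyGet? pwd j = PySem.Str.pyGet? pwd (j + 1)) →
    (PySem.Str.pyGet? pwd i).isSome ∧ (PySem.Str.pyGet? pwd (i + 1)).isSome

lemma pvStrGet_isSome (pwd : String) (i : Int) :
    (PySem.Str.pyGet? pwd i).isSome ↔ (-(pwd.toList.length : Int) ≤ i ∧ i < pwd.toList.length) := by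
  show (PySem.List.pyGet? pwd.toList i).isSome ↔ _
  rw [← Option.ne_none_iff_isSome, Ne, PySem.List.pyGet?_eq_none_iff]
  simp [PySem.Raise.InRange]

lemma pvMain (pwd : String) : ∀ (k : Nat) (address : Int), (5 - address).toNat ≤ k →
    pvNoRaise pwd address → checkForMultiples pwd address = checkForMultiples_alt pwd address := by
  intro k
  induction k with
  | zero =>
    intro address hk _
    have h5 : 5 ≤ address := by omega
    rw [checkForMultiples, checkForMultiples_alt, if_pos (by omega),
      PySem.List.pyRange_one_eq_nil h5]
    rfl
  | succ k ih =>
    intro address hk h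
    by_cases h5 : 5 ≤ address
    · rw [checkForMultiples, checkForMultiples_alt, if_pos (by omega),
        PySem.List.pyRange_one_eq_nil h5]
      rfl
    · have h5 : address < 5 := by omega
      obtain ⟨hsa, hsb⟩ := h address le_rfl (by omega) (by intro j hj1 hj2; omega)
      obtain ⟨a, ha⟩ := Option.isSome_iff_exists.mp hsa
      obtain ⟨b, hb⟩ := Option.isSome_iff_exists.mp hsb
      rw [checkForMultiples, if_neg (by omega), ha, hb]
      rw [checkForMultiples_alt, PySem.List.pyRange_one_cons h5, List.find?_cons, ha, hb]
      by_cases hab : a = b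
      · simp only [hab, beq_self_eq_true, Bool.not_true]
        rw [ih (address + 1) (by omega) ?_]
        · rfl
        · intro i hi1 hi2 hchain
          refine h i (by omega) hi2 ?_
          intro j hj1 hj2
          by_cases hja : j = address
          · subst hja; rw [ha, hb, hab]
          · exact hchain j (by omega) hj2
      · simp only [if_neg hab]
        have : (some a == some b) = false := by simp [hab]
        rw [this]
        rfl

lemma pvPreNoRaise (pwd : String) (address : Int) :
    Pre_checkForMultiples pwd address → pvNoRaise pwd address := by
  intro hpre i hi1 hi2 hchain
  rcases hpre with h5 | ⟨hn, hlo⟩ | ⟨hlo, hhi, hn, m, hm, hne⟩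
  · omega
  · constructor <;> rw [pvStrGet_isSome] <;> omega
  · rw [PySem.List.mem_pyRange_one] at hm
    have him : i ≤ m := by
      by_contra hgt
      exact hne (hchain m (by omega) (by omega))
    constructor <;> rw [pvStrGet_isSome] <;> omega

-- ===== VERDICT (by name: the statement is the Claim_ definition above) =====
theorem checkForMultiples_spec : Claim_equal_checkForMultiples := by
  intro pwd address _ hpre
  unfold Spec_checkForMultiples
  exact pvMain pwd (5 - address).toNat address le_rfl (pvPreNoRaise pwd address hpre)
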